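-- pv_equiv track=rewrite | github.com/adrshsrvstv/CS4278-5478-Project-Materials | Intentions.py | get_allowed_moves
-- ===== SOURCE A (Python) =====
-- def get_allowed_moves(tile, prev_move):
--     moves = {'right': [1, 0], 'up': [0, -1], 'left': [-1, 0], 'down': [0, 1]}
--     move_names = ['right', 'up', 'left', 'down']
--     cardinals = ['E', 'N', 'W', 'S']
--     ok_moves = []
--     if tile == '4way':
--         return moves
--     tile_type, dir = tile.split('/')
--     if dir == 'N':
--         ok_moves = [3]
--         if tile_type == 'straight':
--             ok_moves += [1]
--         elif tile_type == 'curve_left':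
--             ok_moves += [2]
--         elif tile_type == 'curve_right':
--             ok_moves += [0]
--         elif tile_type == '3way_left':
--             ok_moves += [1, 2]
--         elif tile_type == '3way_right':
--             ok_moves += [1, 0]
--     elif dir == 'E':
--         ok_moves = [2]
--         if tile_type == 'straight':
--             ok_moves += [0]
--         elif tile_type == 'curve_left':
--             ok_moves += [1]
--         elif tile_type == 'curve_right':
--             ok_moves += [3]
--         elif tile_type == '3way_left':
--             ok_moves += [0, 1]
--         elif tile_type == '3way_right':
--             ok_moves += [0, 3]
--     elif dir == 'S':
--         ok_moves = [1]
--         if tile_type == 'straight':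
--             ok_moves += [3]
--         elif tile_type == 'curve_left':
--             ok_moves += [0]
--         elif tile_type == 'curve_right':
--             ok_moves += [2]
--         elif tile_type == '3way_left':
--             ok_moves += [3, 0]
--         elif tile_type == '3way_right':
--             ok_moves += [3, 2]
--     elif dir == 'W':
--         ok_moves = [0]
--         if tile_type == 'straight':
--             ok_moves += [2]
--         elif tile_type == 'curve_left':
--             ok_moves += [3]
--         elif tile_type == 'curve_right':
--             ok_moves += [1]
--         elif tile_type == '3way_left':
--             ok_moves += [2, 3]
--         elif tile_type == '3way_right':
--             ok_moves += [2, 1]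
--     allowed_moves = {}
--     rotate_factor = 0
--     for move in ok_moves:
--         allowed_moves[move_names[move]] = moves[move_names[move]]
--     return allowed_moves
-- ===== SOURCE B (Python) =====
-- def get_allowed_moves(tile, prev_move):
--     moves = {'right': [1, 0], 'up': [0, -1], 'left': [-1, 0], 'down': [0, 1]}
--     if tile == '4way':
--         return moves
--     tile_type, dir = tile.split('/')
--     dirs = {'N': 0, 'E': 1, 'S': 2, 'W': 3}
--     k = dirs.get(dir)
--     if k is None:
--         return {}
--     base = {'straight': [3, 1], 'curve_left': [3, 2], 'curve_right': [3, 0],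
--             '3way_left': [3, 1, 2], '3way_right': [3, 1, 0]}.get(tile_type, [3])
--     names = ['right', 'up', 'left', 'down']
--     return {names[(v - k) % 4]: moves[names[(v - k) % 4]] for v in base}
-- ===== Notes on version B (the rewrite author's own statement) =====
-- stated objective: simpler
-- what changed: Replaces the 4x5 enumerated direction/tile branch table by a direction-index map plus one base pattern table relative to North, rotated with (v - k) % 4.
import Mathlib
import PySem

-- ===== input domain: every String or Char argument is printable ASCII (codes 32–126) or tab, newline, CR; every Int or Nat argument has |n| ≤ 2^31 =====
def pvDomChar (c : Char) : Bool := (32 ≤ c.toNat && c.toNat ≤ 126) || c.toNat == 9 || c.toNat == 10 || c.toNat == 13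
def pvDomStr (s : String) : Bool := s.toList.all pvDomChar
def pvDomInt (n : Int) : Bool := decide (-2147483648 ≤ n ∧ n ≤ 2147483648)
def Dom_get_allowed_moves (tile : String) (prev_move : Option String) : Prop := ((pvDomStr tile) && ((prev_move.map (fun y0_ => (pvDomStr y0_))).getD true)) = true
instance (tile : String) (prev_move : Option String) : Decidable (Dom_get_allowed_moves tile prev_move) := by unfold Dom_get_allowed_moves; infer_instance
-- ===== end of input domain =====

-- B replaces A's 4×5 enumerated direction/tile branches by one base table (patterns relative to N)
-- rotated by the direction index via (v - k) % 4: simpler, a single source of truth for the geometry.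


-- ===== PORT A =====
def get_allowed_moves (tile : String) (prev_move : Option String) : List (String × List Int) :=
  let moves : PySem.Dict String (List Int) :=
    PySem.Dict.ofList [("right", [1, 0]), ("up", [0, -1]), ("left", [-1, 0]), ("down", [0, 1])]
  let move_names : List String := ["right", "up", "left", "down"]
  if tile == "4way" then moves.items
  else
    match PySem.Str.split? tile "/" with
    | some [tile_type, dir] =>
      let ok_moves : List Int :=
        if dir == "N" then
          [3] ++ (if tile_type == "straight" then [1]
                  else if tile_type == "curve_left" then [2]
                  else if tile_type == "curve_right" then [0]
                  else if tile_type == "3way_left" then [1, 2]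
                  else if tile_type == "3way_right" then [1, 0]
                  else [])
        else if dir == "E" then
          [2] ++ (if tile_type == "straight" then [0]
                  else if tile_type == "curve_left" then [1]
                  else if tile_type == "curve_right" then [3]
                  else if tile_type == "3way_left" then [0, 1]
                  else if tile_type == "3way_right" then [0, 3]
                  else [])
        else if dir == "S" then
          [1] ++ (if tile_type == "straight" then [3]
                  else if tile_type == "curve_left" then [0]
                  else if tile_type == "curve_right" then [2]
                  else if tile_type == "3way_left" then [3, 0]
                  else if tile_type == "3way_right" then [3, 2]
                  else [])
        else if dir == "W" then
          [0] ++ (if tile_type == "straight" then [2]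
                  else if tile_type == "curve_left" then [3]
                  else if tile_type == "curve_right" then [1]
                  else if tile_type == "3way_left" then [2, 3]
                  else if tile_type == "3way_right" then [2, 1]
                  else [])
        else []
      (ok_moves.foldl (fun d m =>
        let name := PySem.List.pyGetD move_names m ""
        PySem.Dict.insert d name (PySem.Dict.getD moves name [])) PySem.Dict.empty).items
    | _ => []       -- Python raises ValueError here (split not yielding 2 parts); excluded by Pre_

-- ===== PORT B =====
def get_allowed_moves_alt (tile : String) (prev_move : Option String) : List (String × List Int) :=
  let moves : PySem.Dict String (List Int) :=
    PySem.Dict.ofList [("right", [1, 0]), ("up", [0, -1]), ("left", [-1, 0]), ("down", [0, 1])]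
  if tile == "4way" then moves.items
  else
    let parts := (PySem.Str.split? tile "/").getD []
    if parts.length == 2 then
      let tile_type := PySem.List.pyGetD parts 0 ""
      let dir := PySem.List.pyGetD parts 1 ""
      let dirs : PySem.Dict String Int := PySem.Dict.ofList [("N", 0), ("E", 1), ("S", 2), ("W", 3)]
      match PySem.Dict.get? dirs dir with
      | none => []
      | some k =>
        let base : List Int :=
          PySem.Dict.getD
            (PySem.Dict.ofList [("straight", [3, 1]), ("curve_left", [3, 2]), ("curve_right", [3, 0]),
             ("3way_left", [3, 1, 2]), ("3way_right", [3, 1, 0])]) tile_type [3]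
        let names : List String := ["right", "up", "left", "down"]
        (base.foldl (fun d v =>
          let name := PySem.List.pyGetD names (PySem.Int.mod (v - k) 4) ""
          PySem.Dict.insert d name (PySem.Dict.getD moves name [])) PySem.Dict.empty).items
    else []       -- Python raises ValueError here (unpacking not-2 parts); excluded by Pre_

-- ===== PRECONDITION & SPEC =====
-- Pre_ excludes exactly the tiles (other than '4way') whose split on '/' does not yield two parts:
-- there Python A raises ValueError on tuple unpacking.
def Pre_get_allowed_moves (tile : String) (prev_move : Option String) : Prop :=
  tile = "4way" ∨ ((PySem.Str.split? tile "/").getD []).length = 2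
instance (tile : String) (prev_move : Option String) : Decidable (Pre_get_allowed_moves tile prev_move) := by unfold Pre_get_allowed_moves; infer_instance
def pvWitness_get_allowed_moves : String × Option String := ("straight/N", none)

def Spec_get_allowed_moves (tile : String) (prev_move : Option String) (out : List (String × List Int)) : Prop := out = get_allowed_moves_alt tile prev_move
instance (tile : String) (prev_move : Option String) (out : List (String × List Int)) : Decidable (Spec_get_allowed_moves tile prev_move out) := by unfold Spec_get_allowed_moves; infer_instance

-- ===== CLAIM (what is proved, stated in full; the proofs are below) =====
def Claim_equal_get_allowed_moves : Prop := ∀ (tile : String) (prev_move : Option String), Dom_get_allowed_moves tile prev_move → Pre_get_allowed_moves tile prev_move → Spec_get_allowed_moves tile prev_move (get_allowed_moves tile prev_move)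

-- ===== LEMMAS AND PROOFS =====

-- ===== VERDICT (by name: the statement is the Claim_ definition above) =====
theorem get_allowed_moves_spec : Claim_equal_get_allowed_moves := by
  intro tile pm _ hpre
  unfold Spec_get_allowed_moves
  by_cases h4 : tile = "4way"
  · subst h4; rfl
  · have hlen : ((PySem.Str.split? tile "/").getD []).length = 2 :=
      hpre.resolve_left h4
    rcases hsp : PySem.Str.split? tile "/" with _ | l
    · rw [hsp] at hlen; simp at hlen
    · rw [hsp] at hlen
      simp only [Option.getD_some] at hlen
      obtain ⟨t, d, rfl⟩ := List.length_eq_two.mp hlen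
      have hp0 : PySem.List.pyGetD [t, d] 0 "" = t := rfl
      have hp1 : PySem.List.pyGetD [t, d] 1 "" = d := rfl
      simp only [get_allowed_moves, get_allowed_moves_alt, hsp, Option.getD_some,
        List.length_cons, List.length_nil, hp0, hp1, beq_iff_eq, if_neg h4]
      have e1 : (PySem.Dict.ofList [("N", (0:Int)), ("E", 1), ("S", 2), ("W", 3)]) =
          PySem.Dict.mk [("N", 0), ("E", 1), ("S", 2), ("W", 3)] := rfl
      have e2 : (PySem.Dict.ofList [("straight", [(3:Int), 1]), ("curve_left", [3, 2]), ("curve_right", [3, 0]),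
             ("3way_left", [3, 1, 2]), ("3way_right", [3, 1, 0])]) =
          PySem.Dict.mk [("straight", [3, 1]), ("curve_left", [3, 2]), ("curve_right", [3, 0]),
             ("3way_left", [3, 1, 2]), ("3way_right", [3, 1, 0])] := rfl
      by_cases hd1 : d = "N"
      · subst hd1
        by_cases ht1 : t = "straight"; · subst ht1; rfl
        by_cases ht2 : t = "curve_left"; · subst ht2; rfl
        by_cases ht3 : t = "curve_right"; · subst ht3; rfl
        by_cases ht4 : t = "3way_left"; · subst ht4; rfl
        by_cases ht5 : t = "3way_right"; · subst ht5; rfl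
        simp [ht1, ht2, ht3, ht4, ht5, Ne.symm ht1, Ne.symm ht2, Ne.symm ht3, Ne.symm ht4, Ne.symm ht5, e1, e2,
              PySem.Dict.getD, PySem.Dict.get?, PySem.Dict.empty]
      by_cases hd2 : d = "E"
      · subst hd2
        by_cases ht1 : t = "straight"; · subst ht1; rfl
        by_cases ht2 : t = "curve_left"; · subst ht2; rfl
        by_cases ht3 : t = "curve_right"; · subst ht3; rfl
        by_cases ht4 : t = "3way_left"; · subst ht4; rfl
        by_cases ht5 : t = "3way_right"; · subst ht5; rfl
        simp [ht1, ht2, ht3, ht4, ht5, Ne.symm ht1, Ne.symm ht2, Ne.symm ht3, Ne.symm ht4, Ne.symm ht5, e1, e2,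
              PySem.Dict.getD, PySem.Dict.get?, PySem.Dict.empty]
      by_cases hd3 : d = "S"
      · subst hd3
        by_cases ht1 : t = "straight"; · subst ht1; rfl
        by_cases ht2 : t = "curve_left"; · subst ht2; rfl
        by_cases ht3 : t = "curve_right"; · subst ht3; rfl
        by_cases ht4 : t = "3way_left"; · subst ht4; rfl
        by_cases ht5 : t = "3way_right"; · subst ht5; rfl
        simp [ht1, ht2, ht3, ht4, ht5, Ne.symm ht1, Ne.symm ht2, Ne.symm ht3, Ne.symm ht4, Ne.symm ht5, e1, e2,
              PySem.Dict.getD, PySem.Dict.get?, PySem.Dict.empty]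
      by_cases hd4 : d = "W"
      · subst hd4
        by_cases ht1 : t = "straight"; · subst ht1; rfl
        by_cases ht2 : t = "curve_left"; · subst ht2; rfl
        by_cases ht3 : t = "curve_right"; · subst ht3; rfl
        by_cases ht4 : t = "3way_left"; · subst ht4; rfl
        by_cases ht5 : t = "3way_right"; · subst ht5; rfl
        simp [ht1, ht2, ht3, ht4, ht5, Ne.symm ht1, Ne.symm ht2, Ne.symm ht3, Ne.symm ht4, Ne.symm ht5, e1, e2,
              PySem.Dict.getD, PySem.Dict.get?, PySem.Dict.empty]
      simp [hd1, hd2, hd3, hd4, Ne.symm hd1, Ne.symm hd2, Ne.symm hd3, Ne.symm hd4, e1,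
            PySem.Dict.get?, PySem.Dict.empty]
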